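-- pv_equiv track=rewrite | github.com/Caste00/Conway_game_of_life | sketch/bozza.py | espandi_world
-- ===== SOURCE A (Python) =====
-- def espandi_world(world, larghezza, altezza):
--     new_world = [[False] * larghezza for _ in range(altezza)]
--     offset_x = (altezza - len(world)) // 2
--     offset_y = (larghezza - len(world[0])) // 2
--
--     for x in range(len(world)):
--         for y in range(len(world[0])):
--             new_world[offset_x + x][offset_y + y] = world[x][y]
--
--     return new_world
-- ===== SOURCE B (Python) =====
-- def espandi_world(world, larghezza, altezza):
--     height, width = len(world), len(world[0])
--     offset_x = (altezza - height) // 2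
--     offset_y = (larghezza - width) // 2
--     if offset_x < 0 or offset_y < 0:
--         raise IndexError("world does not fit in a %s x %s grid" % (larghezza, altezza))
--     top = [[False] * larghezza for _ in range(offset_x)]
--     bottom = [[False] * larghezza for _ in range(altezza - offset_x - height)]
--     middle = [[False] * offset_y + [row[y] for y in range(width)]
--               + [False] * (larghezza - offset_y - width) for row in world]
--     return top + middle + bottom
-- ===== Notes on version B (the rewrite author's own statement) =====
-- stated objective: simpler
-- what changed: B checks that the world fits, then assembles the result by row-level list concatenation (blank top rows, each world row padded left/right to the grid width, blank bottom rows) instead of allocating a full grid and overwriting it cell by cell with a nested index loop.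
-- outside the precondition, e.g. on espandi_world([[True, False], [True, True]], 1, 2): A returns [[False], [True]], B raises IndexError
import Mathlib
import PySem

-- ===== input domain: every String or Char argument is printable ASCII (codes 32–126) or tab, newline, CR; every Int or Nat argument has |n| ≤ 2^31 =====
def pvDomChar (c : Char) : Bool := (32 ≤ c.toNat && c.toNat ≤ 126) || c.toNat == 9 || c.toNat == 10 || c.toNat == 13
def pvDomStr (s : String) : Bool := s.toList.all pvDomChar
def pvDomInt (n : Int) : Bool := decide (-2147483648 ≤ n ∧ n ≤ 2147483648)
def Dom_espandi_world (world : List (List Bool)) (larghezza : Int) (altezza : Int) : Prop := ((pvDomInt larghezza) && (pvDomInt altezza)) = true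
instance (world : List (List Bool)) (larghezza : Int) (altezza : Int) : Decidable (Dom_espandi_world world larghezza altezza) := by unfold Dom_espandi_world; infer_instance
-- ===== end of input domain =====

-- B builds the expanded grid by concatenating blank rows and padded copies of the world's rows,
-- instead of A's allocate-then-overwrite nested per-cell loop (same asymptotic cost, simpler decomposition).


-- ===== PORT A =====
-- Literal port of A.  `len(world[0])` is taken as `(world.headD []).length` (on the empty world
-- Python raises IndexError; such inputs are outside Pre_).  `world[x][y]` uses `getD` (x is always
-- in range; y can be out of range only on jagged worlds, where Python raises — outside Pre_).
def espandi_world (world : List (List Bool)) (larghezza : Int) (altezza : Int) : List (List Bool) :=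
  let new_world := List.replicate altezza.toNat (List.replicate larghezza.toNat false)
  let offset_x := PySem.Int.floordiv (altezza - (world.length : Int)) 2
  let offset_y := PySem.Int.floordiv (larghezza - ((world.headD []).length : Int)) 2
  (List.range world.length).foldl (fun nw (x : Nat) =>
    (List.range (world.headD []).length).foldl (fun nw (y : Nat) =>
      PySem.List.pySetD nw (offset_x + (x : Int))
        (PySem.List.pySetD (PySem.List.pyGetD nw (offset_x + (x : Int)) [])
          (offset_y + (y : Int)) ((world.getD x []).getD y false))) nw) new_world

-- ===== PORT B =====
-- Literal port of B (Source B): fit check, then blank top rows ++ padded middle rows ++ blank bottom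
-- rows.  `world[0]` is `world.headD []` (Python raises IndexError on the empty world, outside
-- Pre_); where Source B raises IndexError (negative offset) the port returns [] (outside Pre_).
def espandi_world_alt (world : List (List Bool)) (larghezza : Int) (altezza : Int) : List (List Bool) :=
  let width := (world.headD []).length
  let height := world.length
  let offset_x := PySem.Int.floordiv (altezza - (height : Int)) 2
  let offset_y := PySem.Int.floordiv (larghezza - (width : Int)) 2
  if offset_x < 0 ∨ offset_y < 0 then []
  else
    let top := List.replicate offset_x.toNat (List.replicate larghezza.toNat false)
    let bottom := List.replicate (altezza - offset_x - (height : Int)).toNat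
                    (List.replicate larghezza.toNat false)
    let middle := world.map (fun row =>
      List.replicate offset_y.toNat false
        ++ (List.range width).map (fun (y : Nat) => PySem.List.pyGetD row (y : Int) false)
        ++ List.replicate (larghezza - offset_y - (width : Int)).toNat false)
    top ++ middle ++ bottom

-- ===== PRECONDITION & SPEC =====
-- Pre_ excludes: the empty world and worlds with a row shorter than row 0 (A raises IndexError
-- there, and so does B), and target dimensions smaller than the world, where A raises IndexError
-- or writes cells at accidental wrapped positions via Python negative indexing while B raises
-- IndexError.
def Pre_espandi_world (world : List (List Bool)) (larghezza : Int) (altezza : Int) : Prop :=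
  world ≠ [] ∧ (∀ r ∈ world, (world.headD []).length ≤ r.length) ∧
    ((world.headD []).length : Int) ≤ larghezza ∧ ((world.length : Int)) ≤ altezza
instance (world : List (List Bool)) (larghezza : Int) (altezza : Int) : Decidable (Pre_espandi_world world larghezza altezza) := by unfold Pre_espandi_world; infer_instance

def pvWitness_espandi_world : List (List Bool) × Int × Int := ([[true, false], [false, true]], 4, 4)

def Spec_espandi_world (world : List (List Bool)) (larghezza : Int) (altezza : Int) (out : List (List Bool)) : Prop := out = espandi_world_alt world larghezza altezza
instance (world : List (List Bool)) (larghezza : Int) (altezza : Int) (out : List (List Bool)) : Decidable (Spec_espandi_world world larghezza altezza out) := by unfold Spec_espandi_world; infer_instance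

-- ===== CLAIM (what is proved, stated in full; the proofs are below) =====
def Claim_equal_espandi_world : Prop := ∀ (world : List (List Bool)) (larghezza : Int) (altezza : Int), Dom_espandi_world world larghezza altezza → Pre_espandi_world world larghezza altezza → Spec_espandi_world world larghezza altezza (espandi_world world larghezza altezza)

-- ===== LEMMAS AND PROOFS =====

-- cell value of a grid, with defaults
def cellD (g : List (List Bool)) (i j : Nat) : Bool := (g.getD i []).getD j false

-- one Python assignment new_world[i][j] = v, at in-range Nat indices
def gridSet (g : List (List Bool)) (i j : Nat) (v : Bool) : List (List Bool) :=
  g.set i ((g.getD i []).set j v)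

theorem gridSet_length (g : List (List Bool)) (i j : Nat) (v : Bool) :
    (gridSet g i j v).length = g.length := by simp [gridSet]

theorem getD_set_list {α : Type} (l : List α) (n k : Nat) (x d : α) :
    (l.set n x).getD k d = if k = n ∧ n < l.length then x else l.getD k d := by
  unfold List.getD
  rw [List.getElem?_set]
  split_ifs <;> simp_all

theorem gridSet_rowlen (g : List (List Bool)) (a b t : Nat) (v : Bool) :
    ((gridSet g a b v).getD t []).length = (g.getD t []).length := by
  unfold gridSet
  rw [getD_set_list]
  split_ifs with h
  · obtain ⟨h1, h2⟩ := h; subst h1; simp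
  · rfl

theorem gridSet_cell (g : List (List Bool)) (a b i j : Nat) (v : Bool) :
    cellD (gridSet g a b v) i j =
      if i = a ∧ j = b ∧ a < g.length ∧ b < (g.getD a []).length then v
      else cellD g i j := by
  unfold cellD gridSet
  rw [getD_set_list]
  by_cases h : i = a ∧ a < g.length
  · obtain ⟨h1, h2⟩ := h; subst h1
    rw [if_pos ⟨rfl, h2⟩, getD_set_list]
    split_ifs <;> first | rfl | omega
  · rw [if_neg h]
    split_ifs with h2
    · exact absurd ⟨h2.1, h2.2.2.1⟩ h
    · rfl

-- the fold preserves any invariant preserved by each step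
theorem foldl_inv {α β : Type} (f : β → α → β) (P : β → Prop)
    (hf : ∀ b a, P b → P (f b a)) : ∀ (l : List α) (b : β), P b → P (l.foldl f b) := by
  intro l
  induction l with
  | nil => intro b hb; simpa using hb
  | cons x xs ih => intro b hb; exact ih (f b x) (hf b x hb)

-- inner row loop: writes source s into row R, columns C..C+w-1
def innerF (s : List Bool) (R C w : Nat) (g : List (List Bool)) : List (List Bool) :=
  (List.range w).foldl (fun acc y => gridSet acc R (C + y) (s.getD y false)) g

theorem innerF_length (s : List Bool) (R C w : Nat) (g : List (List Bool)) :
    (innerF s R C w g).length = g.length := by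
  exact foldl_inv _ (fun b => b.length = g.length)
    (fun b a hb => (gridSet_length b R (C + a) _).trans hb) (List.range w) g rfl

theorem innerF_rowlen (s : List Bool) (R C w t : Nat) (g : List (List Bool)) :
    ((innerF s R C w g).getD t []).length = (g.getD t []).length := by
  exact foldl_inv _ (fun b => (b.getD t []).length = (g.getD t []).length)
    (fun b a hb => (gridSet_rowlen b R (C + a) t _).trans hb) (List.range w) g rfl

theorem innerF_cell (s : List Bool) (R C w : Nat) :
    ∀ (g : List (List Bool)) (i j : Nat),
    cellD (innerF s R C w g) i j =
      if i = R ∧ R < g.length ∧ C ≤ j ∧ j < C + w ∧ j < (g.getD R []).length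
      then s.getD (j - C) false else cellD g i j := by
  induction w with
  | zero =>
      intro g i j
      simp only [innerF, List.range_zero, List.foldl_nil]
      split_ifs with h
      · omega
      · rfl
  | succ w ih =>
      intro g i j
      have hstep : innerF s R C (w + 1) g
          = gridSet (innerF s R C w g) R (C + w) (s.getD w false) := by
        unfold innerF
        rw [List.range_succ, List.foldl_append, List.foldl_cons, List.foldl_nil]
      rw [hstep, gridSet_cell, ih, innerF_length, innerF_rowlen]
      by_cases hR : i = R ∧ R < g.length
      · obtain ⟨h1, h2⟩ := hR; subst h1
        by_cases hj : j < (g.getD i []).length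
        · by_cases hjw : j = C + w
          · subst hjw
            rw [if_pos ⟨rfl, rfl, h2, hj⟩, if_pos ⟨rfl, h2, by omega, by omega, hj⟩]
            congr 1; omega
          · rw [if_neg (by tauto)]
            split_ifs <;> first | rfl | omega
        · rw [if_neg (by rintro ⟨-, rfl, -, hk⟩; exact hj hk),
              if_neg (by rintro ⟨-, -, -, -, hk⟩; exact hj hk),
              if_neg (by rintro ⟨-, -, -, -, hk⟩; exact hj hk)]
      · rw [if_neg (by tauto)]
        split_ifs <;> first | rfl | omega

-- outer loop over the rows of ws, writing row x of ws into row R0+x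
def outerF (ws : List (List Bool)) (R0 C w : Nat) (g : List (List Bool)) : List (List Bool) :=
  (List.range ws.length).foldl (fun acc x => innerF (ws.getD x []) (R0 + x) C w acc) g

theorem outerF_length (ws : List (List Bool)) (R0 C w : Nat) (g : List (List Bool)) :
    (outerF ws R0 C w g).length = g.length := by
  exact foldl_inv _ (fun b => b.length = g.length)
    (fun b a hb => (innerF_length _ (R0 + a) C w b).trans hb) (List.range ws.length) g rfl

theorem outerF_rowlen (ws : List (List Bool)) (R0 C w t : Nat) (g : List (List Bool)) :
    ((outerF ws R0 C w g).getD t []).length = (g.getD t []).length := by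
  exact foldl_inv _ (fun b => (b.getD t []).length = (g.getD t []).length)
    (fun b a hb => (innerF_rowlen _ (R0 + a) C w t b).trans hb) (List.range ws.length) g rfl

theorem outerF_snoc (ws : List (List Bool)) (s : List Bool) (R0 C w : Nat)
    (g : List (List Bool)) :
    outerF (ws ++ [s]) R0 C w g = innerF s (R0 + ws.length) C w (outerF ws R0 C w g) := by
  unfold outerF
  rw [List.length_append, List.length_singleton, List.range_succ, List.foldl_append,
    List.foldl_cons, List.foldl_nil]
  have hlast : (ws ++ [s]).getD ws.length [] = s := by
    unfold List.getD
    rw [List.getElem?_append_right (by omega)]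
    simp
  rw [hlast]
  congr 1
  apply PySem.List.foldl_congr_mem
  intro acc x hx
  have hx' : x < ws.length := List.mem_range.mp hx
  have hget : (ws ++ [s]).getD x [] = ws.getD x [] := by
    unfold List.getD
    rw [List.getElem?_append_left hx']
  rw [hget]

theorem outerF_cell (ws : List (List Bool)) (R0 C w : Nat) :
    ∀ (g : List (List Bool)) (i j : Nat),
    cellD (outerF ws R0 C w g) i j =
      if R0 ≤ i ∧ i < R0 + ws.length ∧ i < g.length ∧ C ≤ j ∧ j < C + w ∧ j < (g.getD i []).length
      then (ws.getD (i - R0) []).getD (j - C) false else cellD g i j := by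
  induction ws using List.reverseRecOn with
  | nil =>
      intro g i j
      simp only [outerF, List.length_nil, List.range_zero, List.foldl_nil]
      split_ifs with h
      · omega
      · rfl
  | append_singleton ts s ih =>
      intro g i j
      rw [outerF_snoc, innerF_cell, outerF_length, outerF_rowlen, ih]
      by_cases hR : i = R0 + ts.length ∧ R0 + ts.length < g.length ∧ C ≤ j ∧ j < C + w ∧
          j < (g.getD (R0 + ts.length) []).length
      · obtain ⟨h1, h2, h3, h4, h5⟩ := hR; subst h1
        rw [if_pos ⟨rfl, h2, h3, h4, h5⟩,
          if_pos ⟨by omega, by simp, h2, h3, h4, h5⟩]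
        have : (ts ++ [s]).getD (R0 + ts.length - R0) [] = s := by
          unfold List.getD
          rw [show R0 + ts.length - R0 = ts.length by omega,
            List.getElem?_append_right (by omega)]
          simp
        rw [this]
      · rw [if_neg hR]
        by_cases hC : R0 ≤ i ∧ i < R0 + ts.length ∧ i < g.length ∧ C ≤ j ∧ j < C + w ∧
            j < (g.getD i []).length
        · obtain ⟨c1, c2, c3, c4, c5, c6⟩ := hC
          rw [if_pos ⟨c1, c2, c3, c4, c5, c6⟩,
            if_pos ⟨c1, by simp; omega, c3, c4, c5, c6⟩]
          have : (ts ++ [s]).getD (i - R0) [] = ts.getD (i - R0) [] := by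
            unfold List.getD
            rw [List.getElem?_append_left (by omega)]
          rw [this]
        · rw [if_neg hC]
          rw [if_neg ?_]
          rintro ⟨c1, c2, c3, c4, c5, c6⟩
          by_cases he : i = R0 + ts.length
          · subst he
            exact hR ⟨rfl, c3, c4, c5, c6⟩
          · exact hC ⟨c1, by simp at c2; omega, c3, c4, c5, c6⟩
theorem getD_append_lt {α : Type} (l1 l2 : List α) (i : Nat) (d : α) (h : i < l1.length) :
    (l1 ++ l2).getD i d = l1.getD i d := by
  unfold List.getD
  rw [List.getElem?_append_left h]

theorem getD_append_ge {α : Type} (l1 l2 : List α) (i : Nat) (d : α) (h : l1.length ≤ i) :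
    (l1 ++ l2).getD i d = l2.getD (i - l1.length) d := by
  unfold List.getD
  rw [List.getElem?_append_right h]

theorem getD_replicate' {α : Type} (n i : Nat) (a d : α) :
    (List.replicate n a).getD i d = if i < n then a else d := by
  unfold List.getD
  split_ifs with h
  · rw [List.getElem?_eq_getElem (by simpa using h)]
    simp
  · rw [List.getElem?_eq_none (by simpa using h)]
    rfl

theorem getD_map' {α β : Type} (l : List α) (f : α → β) (i : Nat) (d : α) (d' : β)
    (h : i < l.length) : (l.map f).getD i d' = f (l.getD i d) := by
  unfold List.getD
  rw [List.getElem?_map, List.getElem?_eq_getElem h]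
  rfl

theorem g0_rowlen (n m i : Nat) :
    ((List.replicate n (List.replicate m (false : Bool))).getD i []).length =
      if i < n then m else 0 := by
  rw [getD_replicate']
  split_ifs <;> simp

theorem g0_cell (n m i j : Nat) :
    cellD (List.replicate n (List.replicate m (false : Bool))) i j = false := by
  unfold cellD
  rw [getD_replicate']
  split_ifs with h1
  · rw [getD_replicate']
    split_ifs <;> rfl
  · rfl

theorem range_map_getD_take {α : Type} (l : List α) (w : Nat) (d : α) (h : w ≤ l.length) :
    (List.range w).map (fun y => l.getD y d) = l.take w := by
  apply List.ext_getElem (by simp; omega)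
  intro i h1 h2
  simp only [List.getElem_map, List.getElem_range, List.getElem_take]
  rw [List.getD_eq_getElem l d (by simp at h1; omega)]

theorem getD_take {α : Type} (l : List α) (n k : Nat) (d : α) (h : k < n) :
    (l.take n).getD k d = l.getD k d := by
  unfold List.getD
  rw [List.getElem?_take, if_pos h]

theorem grid_ext (g1 g2 : List (List Bool)) (hl : g1.length = g2.length)
    (hr : ∀ i, i < g1.length → (g1.getD i []).length = (g2.getD i []).length)
    (hc : ∀ i j, i < g1.length → j < (g1.getD i []).length → cellD g1 i j = cellD g2 i j) :
    g1 = g2 := by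
  apply List.ext_getElem hl
  intro i h1 h2
  have hrowD : g1.getD i [] = g1[i] := List.getD_eq_getElem g1 [] h1
  have hrowD2 : g2.getD i [] = g2[i] := List.getD_eq_getElem g2 [] h2
  apply List.ext_getElem
  · rw [← hrowD, ← hrowD2]; exact hr i h1
  · intro j hj1 hj2
    have := hc i j h1 (by rwa [hrowD])
    unfold cellD at this
    rw [hrowD, hrowD2] at this
    rw [List.getD_eq_getElem _ false hj1, List.getD_eq_getElem _ false hj2] at this
    exact this

-- ===== VERDICT (by name: the statement is the Claim_ definition above) =====
theorem espandi_world_spec : Claim_equal_espandi_world := by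
  intro world L H _ hpre
  obtain ⟨hne, hge, hwL, hhH⟩ := hpre
  unfold Spec_espandi_world
  have hh1 : 1 ≤ world.length := List.length_pos_of_ne_nil hne
  have h2pos : (0 : Int) < 2 := by norm_num
  -- offsets as natural numbers
  have hoxE : PySem.Int.floordiv (H - (world.length : Int)) 2 = (H - (world.length : Int)) / 2 :=
    PySem.Int.floordiv_eq_ediv_of_pos h2pos
  have hoyE : PySem.Int.floordiv (L - ((world.headD []).length : Int)) 2
      = (L - ((world.headD []).length : Int)) / 2 :=
    PySem.Int.floordiv_eq_ediv_of_pos h2pos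
  set w := (world.headD []).length with hw
  set h := world.length with hh
  set ox := ((H - (h : Int)) / 2).toNat with hox
  set oy := ((L - (w : Int)) / 2).toNat with hoy
  have e1 : PySem.Int.floordiv (H - (h : Int)) 2 = (ox : Int) := by rw [hoxE, hox]; omega
  have e2 : PySem.Int.floordiv (L - (w : Int)) 2 = (oy : Int) := by rw [hoyE, hoy]; omega
  have hfitx : ox + h ≤ H.toNat := by omega
  have hfity : oy + w ≤ L.toNat := by omega
  -- A's port is the double write loop
  have hA : espandi_world world L H
      = outerF world ox oy w
          (List.replicate H.toNat (List.replicate L.toNat false)) := by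
    unfold espandi_world outerF innerF gridSet
    simp only [e1, e2, ← hw, ← hh, ← Nat.cast_add, PySem.List.pySetD_natCast,
      PySem.List.pyGetD_natCast]
  -- B's port, with the replicate counts written as natural numbers
  have hbot : (H - (ox : Int) - (h : Int)).toNat = H.toNat - ox - h := by omega
  have hpad : (L - (oy : Int) - (w : Int)).toNat = L.toNat - oy - w := by omega
  have hB : espandi_world_alt world L H
      = List.replicate ox (List.replicate L.toNat false)
        ++ world.map (fun row =>
            List.replicate oy false ++ row.take w ++ List.replicate (L.toNat - oy - w) false)
        ++ List.replicate (H.toNat - ox - h) (List.replicate L.toNat false) := by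
    unfold espandi_world_alt
    simp only [e1, e2, ← hw, ← hh, Int.toNat_natCast, hbot, hpad,
      PySem.List.pyGetD_natCast]
    rw [if_neg (by push_neg; exact ⟨by positivity, by positivity⟩)]
    congr 1
    congr 1
    apply List.map_congr_left
    intro row hrow
    rw [range_map_getD_take _ _ _ (hge row hrow)]
  rw [hA, hB]
  set blank := List.replicate L.toNat (false : Bool) with hblank
  set mid := world.map (fun row =>
      List.replicate oy false ++ row.take w ++ List.replicate (L.toNat - oy - w) false) with hmid
  have hmidlen : mid.length = h := by rw [hmid]; simp [hh]
  -- row shapes of the B-side grid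
  have hrowB : ∀ i, i < H.toNat →
      (List.replicate ox blank ++ mid ++ List.replicate (H.toNat - ox - h) blank).getD i []
        = if i < ox then blank
          else if i < ox + h then
            List.replicate oy false ++ (world.getD (i - ox) []).take w
              ++ List.replicate (L.toNat - oy - w) false
          else blank := by
    intro i hi
    rw [List.append_assoc]
    by_cases h1 : i < ox
    · rw [getD_append_lt _ _ _ _ (by simpa using h1), getD_replicate', if_pos h1, if_pos h1]
    · rw [getD_append_ge _ _ _ _ (by simpa using h1), if_neg h1]
      by_cases h2 : i < ox + h
      · rw [getD_append_lt _ _ _ _ (by simp [hmidlen]; omega), if_pos h2, hmid,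
          getD_map' _ _ _ [] _ (by simp [← hh]; omega)]
        simp
      · rw [getD_append_ge _ _ _ _ (by simp [hmidlen]; omega), if_neg h2,
          getD_replicate', if_pos (by simp [hmidlen]; omega)]
  have hrowlen : ∀ i, i < H.toNat → ∀ r, r = (List.replicate ox blank ++ mid
      ++ List.replicate (H.toNat - ox - h) blank).getD i [] → r.length = L.toNat := by
    intro i hi r hr
    rw [hr, hrowB i hi]
    split_ifs with h1 h2
    · simp [hblank]
    · have hmem : world.getD (i - ox) [] ∈ world := by
        rw [List.getD_eq_getElem _ _ (by omega)]
        exact List.getElem_mem _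
      have := hge _ hmem
      rw [List.length_append, List.length_append, List.length_replicate,
        List.length_replicate, List.length_take]
      omega
    · simp [hblank]
  apply grid_ext
  · rw [outerF_length]
    simp [hmidlen]
    omega
  · intro i hi
    rw [outerF_length] at hi
    simp only [List.length_replicate] at hi
    rw [outerF_rowlen, g0_rowlen, if_pos hi]
    exact (hrowlen i hi _ rfl).symm
  · intro i j hi hj
    rw [outerF_length] at hi
    simp only [List.length_replicate] at hi
    rw [outerF_rowlen, g0_rowlen, if_pos hi] at hj
    rw [outerF_cell, g0_cell, g0_rowlen]
    unfold cellD
    rw [hrowB i hi]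
    simp only [List.length_replicate, if_pos hi]
    by_cases h1 : i < ox
    · rw [if_neg (by omega), if_pos h1, hblank, getD_replicate']
      split_ifs <;> rfl
    · rw [if_neg h1]
      by_cases h2 : i < ox + h
      · rw [if_pos h2, List.append_assoc]
        set r := world.getD (i - ox) [] with hr
        have hmem : r ∈ world := by
          rw [hr, List.getD_eq_getElem _ _ (by omega)]
          exact List.getElem_mem _
        have hrl : w ≤ r.length := hge _ hmem
        have htl : (r.take w).length = w := by rw [List.length_take]; omega
        by_cases hj1 : j < oy
        · rw [if_neg (by omega), getD_append_lt _ _ _ _ (by simpa using hj1),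
            getD_replicate', if_pos hj1]
        · rw [getD_append_ge _ _ _ _ (by simpa using hj1)]
          simp only [List.length_replicate]
          by_cases hj2 : j < oy + w
          · rw [if_pos ⟨by omega, by simp [← hh]; omega, hi, by omega, hj2, hj⟩,
              getD_append_lt _ _ _ _ (by omega), getD_take _ _ _ _ (by omega)]
          · rw [if_neg (by omega), getD_append_ge _ _ _ _ (by omega)]
            rw [htl, getD_replicate', if_pos (by omega)]
      · rw [if_neg (by simp [← hh]; omega), if_neg h2, hblank, getD_replicate']
        split_ifs <;> rfl
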